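-- pv_equiv track=rewrite | github.com/tundrv0l/Group-12-Prod | Chapter-5/methods.py | maximal_elements
-- ===== SOURCE A (Python) =====
-- def maximal_elements(elements, relation):
--     maximals = set()
--
--     for a in elements:
--         for b in elements - {a}:
--             if (a, b) in relation:
--                 break
--         else:
--             maximals.add(a)
--
--     return maximals
-- ===== SOURCE B (Python) =====
-- def maximal_elements(elements, relation):
--     # One pass over the relation: an element is non-maximal iff it has an
--     # outgoing edge to a *different* element of the set.
--     blocked = {x for (x, y) in relation if y in elements and y != x}
--     return {e for e in elements if e not in blocked}
-- ===== Notes on version B (the rewrite author's own statement) =====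
-- stated objective: faster
-- what changed: Instead of scanning all other elements for each element (nested loops), B makes one pass over the relation collecting sources of edges to a distinct member, then filters the elements against that set.
import Mathlib
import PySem

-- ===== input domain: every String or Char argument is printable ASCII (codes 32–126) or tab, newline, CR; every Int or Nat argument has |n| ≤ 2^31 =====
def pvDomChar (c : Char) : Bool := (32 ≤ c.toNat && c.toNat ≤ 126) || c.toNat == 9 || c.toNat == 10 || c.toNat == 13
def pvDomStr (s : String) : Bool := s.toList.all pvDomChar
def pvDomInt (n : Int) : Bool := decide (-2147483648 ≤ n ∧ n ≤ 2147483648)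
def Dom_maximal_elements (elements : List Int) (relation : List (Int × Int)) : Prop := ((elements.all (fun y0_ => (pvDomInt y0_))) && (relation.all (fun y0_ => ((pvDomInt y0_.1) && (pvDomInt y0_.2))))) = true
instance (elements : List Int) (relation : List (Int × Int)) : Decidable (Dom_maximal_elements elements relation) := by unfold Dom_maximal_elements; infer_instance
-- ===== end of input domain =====

-- B replaces A's per-element scan of all other elements by a single pass over the relation
-- (collect sources of edges to a distinct member, then filter the elements): asymptotically faster.

-- ===== PORT A =====
def maximal_elements (elements : List Int) (relation : List (Int × Int)) : List Int :=
  -- maximals = set(); for a in elements: for b in elements - {a}: if (a,b) in relation: break / else: maximals.add(a)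
  elements.foldl
    (fun maximals a =>
      if (PySem.Set.diff (PySem.Set.ofList elements) [a]).any (fun b => relation.contains (a, b)) then
        maximals
      else
        PySem.Set.add maximals a)
    PySem.Set.empty

-- ===== PORT B =====
def maximal_elements_alt (elements : List Int) (relation : List (Int × Int)) : List Int :=
  -- blocked = {x for (x, y) in relation if y in elements and y != x}
  let blocked : PySem.Set Int :=
    PySem.Set.ofList ((relation.filter (fun p => elements.contains p.2 && p.2 != p.1)).map Prod.fst)
  -- return {e for e in elements if e not in blocked}
  PySem.Set.ofList (elements.filter (fun e => !(PySem.Set.contains blocked e)))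

-- ===== PRECONDITION & SPEC =====
def Spec_maximal_elements (elements : List Int) (relation : List (Int × Int)) (out : List Int) : Prop := out = maximal_elements_alt elements relation
instance (elements : List Int) (relation : List (Int × Int)) (out : List Int) : Decidable (Spec_maximal_elements elements relation out) := by unfold Spec_maximal_elements; infer_instance

-- ===== CLAIM (what is proved, stated in full; the proofs are below) =====
def Claim_equal_maximal_elements : Prop := ∀ (elements : List Int) (relation : List (Int × Int)), Dom_maximal_elements elements relation → Spec_maximal_elements elements relation (maximal_elements elements relation)

-- ===== LEMMAS AND PROOFS =====

-- The two per-element conditions agree: a has an edge to a distinct member iff a is blocked.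
lemma cond_eq (elements : List Int) (relation : List (Int × Int)) (a : Int) :
    ((PySem.Set.diff (PySem.Set.ofList elements) [a]).any (fun b => relation.contains (a, b)))
      = PySem.Set.contains
          (PySem.Set.ofList ((relation.filter (fun p => elements.contains p.2 && p.2 != p.1)).map Prod.fst)) a := by
  rw [Bool.eq_iff_iff]
  simp only [List.any_eq_true, PySem.Set.mem_diff, PySem.Set.mem_ofList, List.contains_eq_mem,
    PySem.Set.contains_eq_listContains, List.mem_map, List.mem_filter, List.mem_cons,
    List.not_mem_nil, or_false, Bool.and_eq_true, decide_eq_true_eq, bne_iff_ne, ne_eq,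
    Prod.exists, exists_and_right, exists_eq_right]
  constructor
  · rintro ⟨b, ⟨hb, hne⟩, hr⟩
    exact ⟨b, ⟨hr, hb, hne⟩⟩
  · rintro ⟨b, hr, hb, hne⟩
    exact ⟨b, ⟨hb, hne⟩, hr⟩

-- Folding "skip if c, else add" equals folding add over the filtered list.
lemma foldl_if_add (c : Int → Bool) (xs : List Int) (init : PySem.Set Int) :
    xs.foldl (fun s a => if c a then s else PySem.Set.add s a) init
      = (xs.filter (fun a => !c a)).foldl PySem.Set.add init := by
  induction xs generalizing init with
  | nil => rfl
  | cons x xs ih =>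
    simp only [List.foldl_cons, List.filter_cons]
    cases h : c x <;> simp [ih]

-- ===== VERDICT (by name: the statement is the Claim_ definition above) =====
theorem maximal_elements_spec : Claim_equal_maximal_elements := by
  intro elements relation _
  unfold Spec_maximal_elements maximal_elements maximal_elements_alt
  have hfun :
      (fun (maximals : PySem.Set Int) (a : Int) =>
        if (PySem.Set.diff (PySem.Set.ofList elements) [a]).any (fun b => relation.contains (a, b)) then
          maximals
        else PySem.Set.add maximals a)
      = (fun maximals a =>
        if PySem.Set.contains
            (PySem.Set.ofList ((relation.filter (fun p => elements.contains p.2 && p.2 != p.1)).map Prod.fst)) a then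
          maximals
        else PySem.Set.add maximals a) := by
    funext s a; rw [cond_eq]
  rw [hfun, foldl_if_add]
  simp [PySem.Set.ofList_eq_foldl, PySem.Set.empty]
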